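-- pv_equiv track=rewrite | github.com/OTOYO1020/ChatDev_Intermediate | WareHouse/C_231__20250512043808/height_counter.py | count_students_with_min_height
-- ===== SOURCE A (Python) =====
-- from bisect import bisect_left
--
-- def count_students_with_min_height(heights, queries):
--     """
--     Counts the number of students with height at least for each query.
--     Parameters:
--     heights (list of int): List of student heights.
--     queries (list of int): List of height queries.
--     Returns:
--     list of int: Number of students meeting each height requirement.
--     """
--     if not heights:  # Check for empty heights list
--         return [0] * len(queries)  # Return a list of zeros for each query
--     heights.sort()  # Sort the heights for binary search
--     results = []
--     for query in queries:
--         index = bisect_left(heights, query)  # Find the first index where height >= query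
--         count = len(heights) - index  # Count of students with height >= query
--         results.append(count)
--     return results
-- ===== SOURCE B (Python) =====
-- def count_students_with_min_height(heights, queries):
--     # Direct count per query: no sorting, no binary search.
--     # (Unlike A, this does not sort `heights` in place.)
--     return [sum(1 for h in heights if h >= q) for q in queries]
-- ===== Notes on version B (the rewrite author's own statement) =====
-- stated objective: alternative
-- what changed: Replaces in-place sort + bisect_left binary search per query with a direct one-pass linear count of heights >= q for each query (no sorting at all); note B does not mutate heights.
import Mathlib
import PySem

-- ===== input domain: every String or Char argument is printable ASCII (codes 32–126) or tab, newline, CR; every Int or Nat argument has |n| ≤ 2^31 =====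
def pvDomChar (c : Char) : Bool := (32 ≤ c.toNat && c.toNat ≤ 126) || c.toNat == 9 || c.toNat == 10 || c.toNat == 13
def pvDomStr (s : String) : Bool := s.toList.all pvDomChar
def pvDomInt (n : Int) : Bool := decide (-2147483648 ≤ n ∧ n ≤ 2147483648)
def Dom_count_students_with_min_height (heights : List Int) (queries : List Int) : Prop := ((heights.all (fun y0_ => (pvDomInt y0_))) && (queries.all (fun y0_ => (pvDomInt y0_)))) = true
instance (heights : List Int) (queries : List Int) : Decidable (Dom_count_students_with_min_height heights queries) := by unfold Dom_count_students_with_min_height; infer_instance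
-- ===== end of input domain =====

-- B replaces A's in-place sort + bisect_left binary search with a direct linear count of
-- heights >= q per query (alternative decomposition; return-value equivalence only:
-- A sorts `heights` in place, B does not mutate it).


-- ===== PORT A =====
-- literal port of A: empty guard, sort, then for each query append len - bisect_left
def count_students_with_min_height (heights : List Int) (queries : List Int) : List Int :=
  if heights = [] then
    List.replicate queries.length 0
  else
    let s := PySem.List.sorted heights (fun x => x) false
    queries.foldl (fun results query =>
      results ++ [(s.length : Int) - (PySem.List.bisectLeft s query : Int)]) []

-- ===== PORT B =====
-- literal port of B: [sum(1 for h in heights if h >= q) for q in queries]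
def count_students_with_min_height_alt (heights : List Int) (queries : List Int) : List Int :=
  queries.map (fun q => heights.foldl (fun acc h => if q ≤ h then acc + 1 else acc) (0 : Int))

-- ===== PRECONDITION & SPEC =====
def Spec_count_students_with_min_height (heights : List Int) (queries : List Int) (out : List Int) : Prop := out = count_students_with_min_height_alt heights queries
instance (heights : List Int) (queries : List Int) (out : List Int) : Decidable (Spec_count_students_with_min_height heights queries out) := by unfold Spec_count_students_with_min_height; infer_instance

-- ===== CLAIM (what is proved, stated in full; the proofs are below) =====
def Claim_equal_count_students_with_min_height : Prop := ∀ (heights : List Int) (queries : List Int), Dom_count_students_with_min_height heights queries → Spec_count_students_with_min_height heights queries (count_students_with_min_height heights queries)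

-- ===== LEMMAS AND PROOFS =====

-- the foldl-append loop of A builds the map of its body
theorem foldl_append_singleton_eq_map (f : Int → Int) (qs : List Int) (acc : List Int) :
    qs.foldl (fun results q => results ++ [f q]) acc = acc ++ qs.map f := by
  induction qs generalizing acc with
  | nil => simp
  | cons q t ih => simp [List.foldl, ih]

-- B's inner fold counts the elements ≥ q
theorem foldl_count_ge (q : Int) (hs : List Int) :
    hs.foldl (fun acc h => if q ≤ h then acc + 1 else acc) (0 : Int)
      = (hs.countP (fun h => decide (q ≤ h)) : Int) := by
  have := PySem.List.foldl_if_add_one (fun h => decide (q ≤ h)) hs (0 : Int)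
  simpa using this

-- on a sorted list, length - bisectLeft = number of elements ≥ q
theorem length_sub_bisectLeft (s : List Int) (q : Int)
    (hs : List.Pairwise (fun a b => a ≤ b) s) :
    (s.length : Int) - (PySem.List.bisectLeft s q : Int)
      = (s.countP (fun h => decide (q ≤ h)) : Int) := by
  obtain ⟨hk, hlt, hge⟩ := PySem.List.bisectLeft_spec s q hs
  set k := PySem.List.bisectLeft s q with hkdef
  have hsplit : s = s.take k ++ s.drop k := (List.take_append_drop k s).symm
  have h1 : (s.take k).countP (fun h => decide (q ≤ h)) = 0 := by
    rw [List.countP_eq_zero]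
    intro x hx
    obtain ⟨j, hj, hjx⟩ := List.mem_iff_getElem.mp hx
    have hjk : j < k := lt_of_lt_of_le hj (by simp [List.length_take])
    have hjlen : j < s.length := lt_of_lt_of_le hjk hk
    have : s[j] < q := hlt j hjlen hjk
    rw [List.getElem_take] at hjx
    simp [← hjx]
    omega
  have h2 : (s.drop k).countP (fun h => decide (q ≤ h)) = (s.drop k).length := by
    rw [List.countP_eq_length]
    intro x hx
    obtain ⟨j, hj, hjx⟩ := List.mem_iff_getElem.mp hx
    rw [List.getElem_drop] at hjx
    have hjlen : k + j < s.length := by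
      have := hj; simp [List.length_drop] at this; omega
    have : q ≤ s[k + j] := hge (k + j) hjlen (Nat.le_add_right k j)
    simp [← hjx]
    omega
  have hcount : s.countP (fun h => decide (q ≤ h)) = s.length - k := by
    conv_lhs => rw [hsplit]
    rw [List.countP_append, h1, h2, List.length_drop]
    omega
  rw [hcount]
  omega

-- ===== VERDICT (by name: the statement is the Claim_ definition above) =====
theorem count_students_with_min_height_spec : Claim_equal_count_students_with_min_height := by
  intro heights queries _
  unfold Spec_count_students_with_min_height count_students_with_min_height
      count_students_with_min_height_alt
  by_cases hne : heights = []
  · subst hne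
    simp
  · simp only [if_neg hne]
    set s := PySem.List.sorted heights (fun x => x) false with hsdef
    rw [foldl_append_singleton_eq_map]
    simp only [List.nil_append]
    apply List.map_congr_left
    intro q _
    rw [foldl_count_ge]
    have hperm : s.Perm heights := PySem.List.sorted_perm heights (fun x => x) false
    rw [← hperm.countP_eq]
    exact length_sub_bisectLeft s q (PySem.List.sorted_pairwise heights (fun x => x))
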